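-- pv_equiv track=rewrite | github.com/VisargD/100-Days-of-Problem-Solving | Day-9/Kick-Start.py | kick_start
-- ===== SOURCE A (Python) =====
-- def kick_start(arr):
--
--     # kick and start will be used to match the character of the string with 'KICK' and 'START'.
--     kick = 'KICK'
--     start = 'START'
--
--     # kick_count will store the number of characters matching at any point during the while-loop with 'KICK'.
--     # start_count will store the number of characters matching at any point during the while-loop with 'START'.
--     kick_count = 0
--     start_count = 0
--
--     # count is used to store number of 'KICK' sub-strings found.
--     # total is used to store the number of occurences where 'KICK...START' is found in the string.
--     # Initializing index to first index (0).
--     count = 0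
--     total = 0
--     i = 0
--
--     # Using while-loop to iterate through the character of strings.
--     while i != len(arr):
--
--         # This condition finds the occurences of 'KICK' in the string.
--         # If it is found then count is incremented.
--         if arr[i] == kick[kick_count]:
--             start_count = 0
--
--             # The reason to not increment index here is that the last 'K' of 'KICK' can also be first 'K' of 'KICK'.
--             # E.g.: 'KICKICK'.
--             if kick_count == 3:
--                 count += 1
--                 kick_count = 0
--             else:
--                 kick_count += 1
--                 i += 1
--
--         # This condition finds the occurences of 'START' in the string.
--         # If 'START' is found in the string then it can form 'KICK...START' substring with every preceeding 'KICK' occurences.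
--         # count stores the 'KICK' occurences. So add the current count to the total.
--         elif arr[i] == start[start_count]:
--             kick_count = 0
--             if start_count == 4:
--                 total += count
--                 start_count = 0
--                 i += 1
--             else:
--                 start_count += 1
--                 i += 1
--
--         # If at any point, the character is not a part of either 'KICK' or 'START' sub-string then,
--         else:
--
--             # check if the current count of 'KICK' or 'START' is greater than 0. If yes then, initialize the counters to 0 and don't increment index.
--             # The reason to not increment index is that the character can be 'K' or 'S', so it is necessary to consider that character again.
--             if kick_count > 0 or start_count > 0:
--                 kick_count = 0
--                 start_count = 0
--
--             # If the above condition is not the case then simply increment index.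
--             else:
--                 i += 1
--
--     # Finally return the total.
--     return total
-- ===== SOURCE B (Python) =====
-- def kick_start(arr):
--     count = 0
--     total = 0
--     for i in range(len(arr)):
--         if i + 4 <= len(arr) and arr[i] == 'K' and arr[i+1] == 'I' and arr[i+2] == 'C' and arr[i+3] == 'K':
--             count += 1
--         if i + 5 <= len(arr) and arr[i] == 'S' and arr[i+1] == 'T' and arr[i+2] == 'A' and arr[i+3] == 'R' and arr[i+4] == 'T':
--             total += count
--     return total
-- ===== Notes on version B (the rewrite author's own statement) =====
-- stated objective: simpler
-- what changed: Replaced the progress-counter state machine (kick_count/start_count, conditional index stalls and resets) by a single pass that, at every index, checks the 4-char KICK window and the 5-char START window directly and keeps only count/total.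
import Mathlib
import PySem

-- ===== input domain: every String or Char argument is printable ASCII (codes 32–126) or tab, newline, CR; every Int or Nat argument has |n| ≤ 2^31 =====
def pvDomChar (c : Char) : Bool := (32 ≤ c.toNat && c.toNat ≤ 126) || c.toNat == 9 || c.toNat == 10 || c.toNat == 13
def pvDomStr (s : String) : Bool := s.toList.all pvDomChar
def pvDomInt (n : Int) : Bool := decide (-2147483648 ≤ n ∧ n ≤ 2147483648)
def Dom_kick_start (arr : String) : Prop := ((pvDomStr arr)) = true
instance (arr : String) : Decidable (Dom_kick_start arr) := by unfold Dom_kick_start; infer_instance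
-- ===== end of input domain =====

-- B replaces A's progress-counter state machine by independent fixed-window checks at
-- every index (same O(n) cost, plainer code); this file proves they return equal totals.


-- ===== PORT A =====
-- 'KICK' and 'START' as character lists.
def kickL : List Char := ['K', 'I', 'C', 'K']
def startL : List Char := ['S', 'T', 'A', 'R', 'T']

-- A's while-loop, state (kick_count, start_count, count, total, i).  Indexing uses getD
-- with a junk default: on every state A's loop reaches the indices are in range (the
-- counters never exceed 3 resp. 4 and i never exceeds len), so this is exact.  The guard
-- 'i != len(arr)' is written 'i < s.length' (equivalent along the run: i starts at 0,
-- grows by at most 1 per step and the loop stops the moment i = len).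
def loopA (s : List Char) (k st : Nat) (c t : Int) (i : Nat) : Int :=
  if h : i < s.length then
    if s.getD i ' ' = kickL.getD k ' ' then
      if k = 3 then loopA s 0 0 (c + 1) t i
      else loopA s (k + 1) 0 c t (i + 1)
    else if s.getD i ' ' = startL.getD st ' ' then
      if st = 4 then loopA s 0 0 c (t + c) (i + 1)
      else loopA s 0 (st + 1) c t (i + 1)
    else if 0 < k ∨ 0 < st then loopA s 0 0 c t i
    else loopA s k st c t (i + 1)
  else t
termination_by 2 * (s.length - i) + (if 0 < k ∨ 0 < st then 1 else 0)
decreasing_by all_goals simp_all <;> omega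

def kick_start (arr : String) : Int := loopA arr.toList 0 0 0 0 0

-- ===== PORT B =====
-- B's two window tests, literally its bounds-plus-elementwise comparisons.
def kickHere (s : List Char) (i : Nat) : Bool :=
  decide (i + 4 ≤ s.length ∧ s.getD i ' ' = 'K' ∧ s.getD (i + 1) ' ' = 'I'
            ∧ s.getD (i + 2) ' ' = 'C' ∧ s.getD (i + 3) ' ' = 'K')

def startHere (s : List Char) (i : Nat) : Bool :=
  decide (i + 5 ≤ s.length ∧ s.getD i ' ' = 'S' ∧ s.getD (i + 1) ' ' = 'T'
            ∧ s.getD (i + 2) ' ' = 'A' ∧ s.getD (i + 3) ' ' = 'R' ∧ s.getD (i + 4) ' ' = 'T')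

-- B's for-loop over i in range(len(arr)) carrying (count, total).
def loopB (s : List Char) (c t : Int) (i : Nat) : Int :=
  if i < s.length then
    let c' := if kickHere s i then c + 1 else c
    let t' := if startHere s i then t + c' else t
    loopB s c' t' (i + 1)
  else t
termination_by s.length - i
decreasing_by omega

def kick_start_alt (arr : String) : Int := loopB arr.toList 0 0 0

-- ===== PRECONDITION & SPEC =====
def Spec_kick_start (arr : String) (out : Int) : Prop := out = kick_start_alt arr
instance (arr : String) (out : Int) : Decidable (Spec_kick_start arr out) := by unfold Spec_kick_start; infer_instance

-- ===== CLAIM (what is proved, stated in full; the proofs are below) =====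
def Claim_equal_kick_start : Prop := ∀ (arr : String), Dom_kick_start arr → Spec_kick_start arr (kick_start arr)

-- ===== LEMMAS AND PROOFS =====

-- A's partial-match invariant: the k chars just before i agree with the first k chars of p.
def MP (p s : List Char) (i k : Nat) : Prop := ∀ j, j < k → s.getD (i - k + j) ' ' = p.getD j ' '

lemma MP_zero (p s : List Char) (i : Nat) : MP p s i 0 := by intro j hj; omega

lemma MP_extend (p s : List Char) (i k : Nat) (hki : k ≤ i) (hmp : MP p s i k)
    (h : s.getD i ' ' = p.getD k ' ') : MP p s (i + 1) (k + 1) := by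
  intro j hj
  rcases Nat.lt_succ_iff_lt_or_eq.mp hj with hjk | hjk
  · have := hmp j hjk
    rwa [show i + 1 - (k + 1) + j = i - k + j by omega]
  · rw [hjk]
    rwa [show i + 1 - (k + 1) + k = i by omega]

lemma loopB_stop (s : List Char) (c t : Int) (i : Nat) (h : ¬ i < s.length) :
    loopB s c t i = t := by rw [loopB]; simp [h]

lemma loopB_skip (s : List Char) (c t : Int) (i : Nat) (h : i < s.length)
    (hk : kickHere s i = false) (hs : startHere s i = false) :
    loopB s c t i = loopB s c t (i + 1) := by
  rw [loopB]; simp [h, hk, hs]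

lemma loopB_step (s : List Char) (c t : Int) (i : Nat) (h : i < s.length) :
    loopB s c t i =
      loopB s (if kickHere s i then c + 1 else c)
        (if startHere s i then t + (if kickHere s i then c + 1 else c) else t) (i + 1) := by
  rw [loopB]; simp [h]

lemma kickHere_false_of_len (s : List Char) (i : Nat) (h : s.length < i + 4) :
    kickHere s i = false := by
  simp only [kickHere, decide_eq_false_iff_not]; intro hc; omega

lemma startHere_false_of_len (s : List Char) (i : Nat) (h : s.length < i + 5) :
    startHere s i = false := by
  simp only [startHere, decide_eq_false_iff_not]; intro hc; omega

-- first-character refutations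
lemma kickHere_ffc (s : List Char) (i : Nat) (h : s.getD i ' ' ≠ 'K') :
    kickHere s i = false := by
  simp only [kickHere, decide_eq_false_iff_not]; rintro ⟨-, hK, -⟩; exact h hK

lemma startHere_ffc (s : List Char) (i : Nat) (h : s.getD i ' ' ≠ 'S') :
    startHere s i = false := by
  simp only [startHere, decide_eq_false_iff_not]; rintro ⟨-, hS, -⟩; exact h hS

-- refutation at the mismatching offset of a partial match
lemma kickHere_false_at (s : List Char) (i k : Nat) (hk : k ≤ 3) (hki : k ≤ i)
    (h : s.getD i ' ' ≠ kickL.getD k ' ') : kickHere s (i - k) = false := by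
  simp only [kickHere, decide_eq_false_iff_not]
  rintro ⟨hb, h0, h1, h2, h3⟩
  interval_cases k
  · rw [Nat.sub_zero] at h0; exact h (by simpa [kickL] using h0)
  · rw [show i - 1 + 1 = i by omega] at h1; exact h (by simpa [kickL] using h1)
  · rw [show i - 2 + 2 = i by omega] at h2; exact h (by simpa [kickL] using h2)
  · rw [show i - 3 + 3 = i by omega] at h3; exact h (by simpa [kickL] using h3)

lemma startHere_false_at (s : List Char) (i st : Nat) (hst : st ≤ 4) (hsti : st ≤ i)
    (h : s.getD i ' ' ≠ startL.getD st ' ') : startHere s (i - st) = false := by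
  simp only [startHere, decide_eq_false_iff_not]
  rintro ⟨hb, h0, h1, h2, h3, h4⟩
  interval_cases st
  · rw [Nat.sub_zero] at h0; exact h (by simpa [startL] using h0)
  · rw [show i - 1 + 1 = i by omega] at h1; exact h (by simpa [startL] using h1)
  · rw [show i - 2 + 2 = i by omega] at h2; exact h (by simpa [startL] using h2)
  · rw [show i - 3 + 3 = i by omega] at h3; exact h (by simpa [startL] using h3)
  · rw [show i - 4 + 4 = i by omega] at h4; exact h (by simpa [startL] using h4)

-- interior characters of the patterns start neither window
lemma kickL_interior (j : Nat) (h1 : 1 ≤ j) (h2 : j ≤ 2) :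
    kickL.getD j ' ' ≠ 'K' ∧ kickL.getD j ' ' ≠ 'S' := by
  interval_cases j <;> simp [kickL]

lemma startL_interior (j : Nat) (h1 : 1 ≤ j) (h2 : j ≤ 4) :
    startL.getD j ' ' ≠ 'K' ∧ startL.getD j ' ' ≠ 'S' := by
  interval_cases j <;> simp [startL]

lemma startL_ne_K (st : Nat) (h : st ≤ 4) : startL.getD st ' ' ≠ 'K' := by
  interval_cases st <;> simp [startL]

-- skipping a stretch of positions on which neither window matches
lemma loopB_skip_range (s : List Char) (c t : Int) (a b : Nat) (hab : a ≤ b)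
    (hb : b ≤ s.length)
    (h : ∀ q, a ≤ q → q < b → kickHere s q = false ∧ startHere s q = false) :
    loopB s c t a = loopB s c t b := by
  rcases Nat.eq_or_lt_of_le hab with heq | hlt
  · rw [heq]
  · rw [loopB_skip s c t a (by omega) (h a le_rfl hlt).1 (h a le_rfl hlt).2]
    exact loopB_skip_range s c t (a + 1) b (by omega) hb
      (fun q hq1 hq2 => h q (by omega) hq2)
termination_by b - a
decreasing_by omega

-- past position length-4 nothing can match any more: loopB just returns t
lemma loopB_tail (s : List Char) (c t : Int) (i : Nat) (h : s.length < i + 4) :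
    loopB s c t i = t := by
  by_cases hi : i < s.length
  · rw [loopB_skip s c t i hi (kickHere_false_of_len s i h)
        (startHere_false_of_len s i (by omega))]
    exact loopB_tail s c t (i + 1) (by omega)
  · exact loopB_stop s c t i hi
termination_by s.length - i
decreasing_by omega

-- B's loop is unchanged over a partial KICK match [i-k, i) whose next char mismatches
lemma kick_partial_skip (s : List Char) (c t : Int) (i k : Nat) (hk : k ≤ 3) (hki : k ≤ i)
    (hi : i ≤ s.length) (hmp : MP kickL s i k) (hmis : s.getD i ' ' ≠ kickL.getD k ' ') :
    loopB s c t (i - k) = loopB s c t i := by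
  apply loopB_skip_range s c t (i - k) i (by omega) hi
  intro q hq1 hq2
  have hjk : q - (i - k) < k := by omega
  have hcq : s.getD q ' ' = kickL.getD (q - (i - k)) ' ' := by
    have := hmp (q - (i - k)) hjk
    rwa [show i - k + (q - (i - k)) = q by omega] at this
  rcases Nat.eq_zero_or_pos (q - (i - k)) with h0 | hpos
  · have hq : q = i - k := by omega
    constructor
    · rw [hq]; exact kickHere_false_at s i k hk hki hmis
    · apply startHere_ffc; rw [hcq, h0]; simp [kickL]
  · have hint := kickL_interior (q - (i - k)) hpos (by omega)
    exact ⟨kickHere_ffc s q (by rw [hcq]; exact hint.1),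
           startHere_ffc s q (by rw [hcq]; exact hint.2)⟩

-- and likewise over a partial START match [i-st, i)
lemma start_partial_skip (s : List Char) (c t : Int) (i st : Nat) (hst : st ≤ 4)
    (hsti : st ≤ i) (hi : i ≤ s.length) (hmp : MP startL s i st)
    (hmis : s.getD i ' ' ≠ startL.getD st ' ') :
    loopB s c t (i - st) = loopB s c t i := by
  apply loopB_skip_range s c t (i - st) i (by omega) hi
  intro q hq1 hq2
  have hjk : q - (i - st) < st := by omega
  have hcq : s.getD q ' ' = startL.getD (q - (i - st)) ' ' := by
    have := hmp (q - (i - st)) hjk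
    rwa [show i - st + (q - (i - st)) = q by omega] at this
  rcases Nat.eq_zero_or_pos (q - (i - st)) with h0 | hpos
  · have hq : q = i - st := by omega
    constructor
    · apply kickHere_ffc; rw [hcq, h0]; simp [startL]
    · rw [hq]; exact startHere_false_at s i st hst hsti hmis
  · have hint := startL_interior (q - (i - st)) hpos (by omega)
    exact ⟨kickHere_ffc s q (by rw [hcq]; exact hint.1),
           startHere_ffc s q (by rw [hcq]; exact hint.2)⟩

-- The simulation: from any state A's loop reaches (a partial match of one of the two
-- patterns, recorded by MP), A's loop from i equals B's loop restarted at the start of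
-- the partial match.  Strong induction on the fuel bound m.
lemma main_sim (s : List Char) : ∀ (m i k st : Nat) (c t : Int),
    2 * (s.length - i) + (if 0 < k ∨ 0 < st then 1 else 0) < m →
    i ≤ s.length →
    ((st = 0 ∧ k ≤ 3 ∧ k ≤ i ∧ MP kickL s i k) ∨
     (k = 0 ∧ st ≤ 4 ∧ st ≤ i ∧ MP startL s i st)) →
    loopA s k st c t i = loopB s c t (i - k - st) := by
  intro m
  induction m with
  | zero =>
    intro i k st c t hm hi _
    exfalso
    split at hm <;> omega
  | succ m ih =>
    intro i k st c t hm hi hinv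
    by_cases hlt : i < s.length
    · have hδ : (if 0 < k ∨ 0 < st then 1 else 0) ≤ 1 := by split <;> omega
      rw [loopA, dif_pos hlt]
      by_cases h1 : s.getD i ' ' = kickL.getD k ' '
      · rw [if_pos h1]
        rcases hinv with ⟨hst, hk3, hki, hmp⟩ | ⟨hk0, hst4, hsti, hmp⟩
        · -- partial KICK match (st = 0)
          subst hst
          by_cases hk : k = 3
          · -- a full KICK completes at i-3: count += 1, stay at i
            subst hk
            rw [if_pos rfl]
            have hδ1 : (if 0 < 3 ∨ 0 < 0 then 1 else 0) = 1 := by simp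
            rw [hδ1] at hm
            have hrec := ih i 0 0 (c + 1) t (by simp; omega) hi
              (Or.inl ⟨rfl, by omega, by omega, MP_zero kickL s i⟩)
            simp only [Nat.sub_zero] at hrec
            rw [hrec]
            have c0 := hmp 0 (by omega); have c1 := hmp 1 (by omega)
            have c2 := hmp 2 (by omega)
            rw [show i - 3 + 0 = i - 3 by omega] at c0
            rw [show i - 3 + 1 = i - 2 by omega] at c1
            rw [show i - 3 + 2 = i - 1 by omega] at c2
            have hkick : kickHere s (i - 3) = true := by
              simp only [kickHere, decide_eq_true_eq]
              rw [show i - 3 + 1 = i - 2 by omega, show i - 3 + 2 = i - 1 by omega,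
                  show i - 3 + 3 = i by omega]
              exact ⟨by omega, c0.trans rfl, c1.trans rfl, c2.trans rfl, h1.trans rfl⟩
            have hstart : startHere s (i - 3) = false :=
              startHere_ffc s (i - 3) (by rw [c0]; decide)
            have hBstep : loopB s c t (i - 3) = loopB s (c + 1) t (i - 3 + 1) := by
              rw [loopB_step s c t (i - 3) (by omega), hkick, hstart]
              simp
            have hBskip : loopB s (c + 1) t (i - 3 + 1) = loopB s (c + 1) t i := by
              apply loopB_skip_range s (c + 1) t (i - 3 + 1) i (by omega) (by omega)
              intro q hq1 hq2
              have hq : q = i - 2 ∨ q = i - 1 := by omega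
              rcases hq with hq | hq <;> subst hq
              · exact ⟨kickHere_ffc s _ (by rw [c1]; decide),
                       startHere_ffc s _ (by rw [c1]; decide)⟩
              · exact ⟨kickHere_ffc s _ (by rw [c2]; decide),
                       startHere_ffc s _ (by rw [c2]; decide)⟩
            rw [show i - 3 - 0 = i - 3 by omega, hBstep, hBskip]
          · -- KICK match advances
            rw [if_neg hk]
            have hrec := ih (i + 1) (k + 1) 0 c t (by simp; omega) (by omega)
              (Or.inl ⟨rfl, by omega, by omega, MP_extend kickL s i k hki hmp h1⟩)
            rw [hrec]
            congr 1
            omega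
        · -- partial START match, current char is 'K': A restarts a KICK match at i
          subst hk0
          rw [if_neg (by omega)]
          have hK : s.getD i ' ' = 'K' := by simpa [kickL] using h1
          have hrec := ih (i + 1) 1 0 c t (by simp; omega) (by omega)
            (Or.inl ⟨rfl, by omega, by omega,
              MP_extend kickL s i 0 (by omega) (MP_zero kickL s i) (by simpa [kickL])⟩)
          rw [show i + 1 - 1 - 0 = i by omega] at hrec
          rw [hrec, show i - 0 - st = i - st by omega]
          exact (start_partial_skip s c t i st hst4 hsti (by omega) hmp
            (by rw [hK]; exact fun he => startL_ne_K st hst4 he.symm)).symm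
      · rw [if_neg h1]
        by_cases h2 : s.getD i ' ' = startL.getD st ' '
        · rw [if_pos h2]
          rcases hinv with ⟨hst, hk3, hki, hmp⟩ | ⟨hk0, hst4, hsti, hmp⟩
          · -- partial KICK match, current char is 'S': A restarts a START match at i
            subst hst
            rw [if_neg (by omega)]
            have hS : s.getD i ' ' = 'S' := by simpa [startL] using h2
            have hrec := ih (i + 1) 0 1 c t (by simp; omega) (by omega)
              (Or.inr ⟨rfl, by omega, by omega,
                MP_extend startL s i 0 (by omega) (MP_zero startL s i) (by simpa [startL])⟩)
            rw [show i + 1 - 0 - 1 = i by omega] at hrec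
            rw [hrec, show i - k - 0 = i - k by omega]
            exact (kick_partial_skip s c t i k hk3 hki (by omega) hmp h1).symm
          · -- partial START match continues
            subst hk0
            by_cases hst : st = 4
            · -- a full START completes at i-4: total += count
              subst hst
              rw [if_pos rfl]
              have hδ1 : (if 0 < 0 ∨ 0 < 4 then 1 else 0) = 1 := by simp
              rw [hδ1] at hm
              have hrec := ih (i + 1) 0 0 c (t + c) (by simp; omega) (by omega)
                (Or.inl ⟨rfl, by omega, by omega, MP_zero kickL s (i + 1)⟩)
              simp only [Nat.sub_zero] at hrec
              rw [hrec]
              have c0 := hmp 0 (by omega); have c1 := hmp 1 (by omega)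
              have c2 := hmp 2 (by omega); have c3 := hmp 3 (by omega)
              rw [show i - 4 + 0 = i - 4 by omega] at c0
              rw [show i - 4 + 1 = i - 3 by omega] at c1
              rw [show i - 4 + 2 = i - 2 by omega] at c2
              rw [show i - 4 + 3 = i - 1 by omega] at c3
              have hstart : startHere s (i - 4) = true := by
                simp only [startHere, decide_eq_true_eq]
                rw [show i - 4 + 1 = i - 3 by omega, show i - 4 + 2 = i - 2 by omega,
                    show i - 4 + 3 = i - 1 by omega, show i - 4 + 4 = i by omega]
                exact ⟨by omega, c0.trans rfl, c1.trans rfl, c2.trans rfl, c3.trans rfl,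
                  h2.trans rfl⟩
              have hkick : kickHere s (i - 4) = false :=
                kickHere_ffc s (i - 4) (by rw [c0]; decide)
              have hBstep : loopB s c t (i - 4) = loopB s c (t + c) (i - 4 + 1) := by
                rw [loopB_step s c t (i - 4) (by omega), hkick, hstart]
                simp
              have hBskip : loopB s c (t + c) (i - 4 + 1) = loopB s c (t + c) (i + 1) := by
                apply loopB_skip_range s c (t + c) (i - 4 + 1) (i + 1) (by omega) (by omega)
                intro q hq1 hq2
                have hq : q = i - 3 ∨ q = i - 2 ∨ q = i - 1 ∨ q = i := by omega
                rcases hq with hq | hq | hq | hq <;> subst hq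
                · exact ⟨kickHere_ffc s _ (by rw [c1]; decide),
                         startHere_ffc s _ (by rw [c1]; decide)⟩
                · exact ⟨kickHere_ffc s _ (by rw [c2]; decide),
                         startHere_ffc s _ (by rw [c2]; decide)⟩
                · exact ⟨kickHere_ffc s _ (by rw [c3]; decide),
                         startHere_ffc s _ (by rw [c3]; decide)⟩
                · exact ⟨kickHere_ffc s _ (by rw [h2]; decide),
                         startHere_ffc s _ (by rw [h2]; decide)⟩
              rw [show i - 0 - 4 = i - 4 by omega, hBstep, hBskip]
            · -- START match advances
              rw [if_neg hst]
              have hrec := ih (i + 1) 0 (st + 1) c t (by simp; omega) (by omega)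
                (Or.inr ⟨rfl, by omega, by omega, MP_extend startL s i st hsti hmp h2⟩)
              rw [hrec]
              congr 1
              omega
        · -- current char matches neither pattern position
          rw [if_neg h2]
          by_cases h3 : 0 < k ∨ 0 < st
          · -- reset without advancing
            rw [if_pos h3]
            have hδ1 : (if 0 < k ∨ 0 < st then 1 else 0) = 1 := by simp [h3]
            rw [hδ1] at hm
            have hrec := ih i 0 0 c t (by simp; omega) hi
              (Or.inl ⟨rfl, by omega, by omega, MP_zero kickL s i⟩)
            simp only [Nat.sub_zero] at hrec
            rw [hrec]
            rcases hinv with ⟨hst, hk3, hki, hmp⟩ | ⟨hk0, hst4, hsti, hmp⟩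
            · subst hst
              rw [show i - k - 0 = i - k by omega]
              exact (kick_partial_skip s c t i k hk3 hki (by omega) hmp h1).symm
            · subst hk0
              rw [show i - 0 - st = i - st by omega]
              exact (start_partial_skip s c t i st hst4 hsti (by omega) hmp h2).symm
          · -- clean state, plain advance
            rw [if_neg h3]
            have hk0 : k = 0 := by omega
            have hst0 : st = 0 := by omega
            subst hk0; subst hst0
            have hrec := ih (i + 1) 0 0 c t (by simp; omega) (by omega)
              (Or.inl ⟨rfl, by omega, by omega, MP_zero kickL s (i + 1)⟩)
            simp only [Nat.sub_zero] at hrec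
            rw [hrec, show i - 0 - 0 = i by omega]
            exact (loopB_skip s c t i hlt
              (kickHere_ffc s i (fun he => h1 (by simpa [kickL] using he)))
              (startHere_ffc s i (fun he => h2 (by simpa [startL] using he)))).symm
    · -- i = length: A returns t; B from i-k-st finds no further window
      rw [loopA, dif_neg hlt]
      have hieq : i = s.length := by omega
      rcases hinv with ⟨hst, hk3, hki, hmp⟩ | ⟨hk0, hst4, hsti, hmp⟩
      · subst hst
        rw [show i - k - 0 = i - k by omega]
        exact (loopB_tail s c t (i - k) (by omega)).symm
      · subst hk0
        rw [show i - 0 - st = i - st by omega]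
        by_cases hst : st = 4
        · subst hst
          have c0 := hmp 0 (by omega)
          rw [show i - 4 + 0 = i - 4 by omega] at c0
          rw [loopB_skip s c t (i - 4) (by omega)
            (kickHere_ffc s (i - 4) (by rw [c0]; decide))
            (startHere_false_of_len s (i - 4) (by omega))]
          exact (loopB_tail s c t (i - 4 + 1) (by omega)).symm
        · exact (loopB_tail s c t (i - st) (by omega)).symm

-- ===== VERDICT (by name: the statement is the Claim_ definition above) =====
theorem kick_start_spec : Claim_equal_kick_start := by
  intro arr _
  unfold Spec_kick_start kick_start kick_start_alt
  have := main_sim arr.toList (2 * arr.toList.length + 2) 0 0 0 0 0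
    (by simp) (by omega) (Or.inl ⟨rfl, by omega, by omega, MP_zero kickL arr.toList 0⟩)
  simpa using this
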